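-- pv_equiv track=rewrite | github.com/herpaipeter/aoc-2023 | src/day01/day01.py | prefix_number_words_with_digit
-- ===== SOURCE A (Python) =====
-- num_words = ["one", "two", "three", "four", "five", "six", "seven", "eight", "nine"]
--
-- def prefix_number_words_with_digit(text):
--     result = ""
--     for i in range(0, len(text)):
--         wind = get_word_index_at_start(text[i:i + 5])
--         if -1 < wind:
--             result += str(wind + 1) + text[i]
--         else:
--             result += text[i]
--     return result
--
-- def get_word_index_at_start(text):
--     for word in num_words:
--         if 0 == text.find(word):
--             return num_words.index(word)
--     return -1
-- ===== SOURCE B (Python) =====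
-- num_words = ["one", "two", "three", "four", "five", "six", "seven", "eight", "nine"]
--
-- def prefix_number_words_with_digit(text):
--     # phase 1: word-major scan — record every start offset of every number word
--     starts = {}
--     for digit, word in enumerate(num_words, 1):
--         k = len(word)
--         for i in range(len(text) - k + 1):
--             if text[i:i + k] == word:
--                 starts[i] = digit
--     # phase 2: one pass over the text, prefixing the recorded digits
--     return "".join((str(starts[i]) if i in starts else "") + ch
--                    for i, ch in enumerate(text))
-- ===== Notes on version B (the rewrite author's own statement) =====
-- stated objective: alternative
-- what changed: A scans position-by-position, slicing 5 characters and searching the word list at each index; B first does a word-major pass recording every start offset of every number word in a dict, then emits the output in one join pass over the enumerated text.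
import Mathlib
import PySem

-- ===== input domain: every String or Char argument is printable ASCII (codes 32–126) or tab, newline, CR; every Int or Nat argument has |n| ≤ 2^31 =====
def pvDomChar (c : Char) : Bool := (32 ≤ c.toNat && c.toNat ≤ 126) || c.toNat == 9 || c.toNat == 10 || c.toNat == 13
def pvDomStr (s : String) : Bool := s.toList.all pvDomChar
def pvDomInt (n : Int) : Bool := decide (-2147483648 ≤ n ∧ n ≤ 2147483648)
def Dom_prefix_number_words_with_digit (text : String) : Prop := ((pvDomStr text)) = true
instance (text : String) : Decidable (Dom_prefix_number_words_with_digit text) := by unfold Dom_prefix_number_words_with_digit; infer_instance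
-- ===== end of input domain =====

-- B replaces A's per-position scan (slice of 5 + find over the word list) by a word-major
-- pass recording every start offset of every number word in a dict, then one join pass
-- over the enumerated text (objective: alternative decomposition, same asymptotic cost).

-- ===== PORT A =====
def pvNumWords : List String :=
  ["one", "two", "three", "four", "five", "six", "seven", "eight", "nine"]

-- for word in num_words: if 0 == text.find(word): return num_words.index(word); return -1
-- (num_words.index never raises here: the word comes from num_words itself)
def gwiasGo : List String → String → Int
  | [], _ => -1
  | w :: ws, t =>
    if (0 : Int) = PySem.Str.find t w then
      match PySem.List.index? pvNumWords w with
      | some j => (j : Int)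
      | none => -1
    else gwiasGo ws t

def get_word_index_at_start (text : String) : Int := gwiasGo pvNumWords text

def prefix_number_words_with_digit (text : String) : String :=
  (PySem.List.pyRange 0 (PySem.Str.len text) 1).foldl
    (fun result i =>
      let wind := get_word_index_at_start (PySem.Str.slice text (some i) (some (i + 5)))
      if (-1 : Int) < wind then
        -- text[i] never raises: i ∈ range(len(text))
        result ++ PySem.Int.toStr (wind + 1) ++ ((PySem.Str.pyGet? text i).elim "" String.singleton)
      else
        result ++ ((PySem.Str.pyGet? text i).elim "" String.singleton))
    ""

-- ===== PORT B =====
-- phase 1 of Source B: the dict of start offsets of every number word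
def pvStarts (text : String) : PySem.Dict Int Int :=
  (PySem.List.enumerate pvNumWords 1).foldl
    (fun d p =>
      let k := PySem.Str.len p.2
      (PySem.List.pyRange 0 (PySem.Str.len text - k + 1) 1).foldl
        (fun d2 i =>
          if PySem.Str.slice text (some i) (some (i + k)) == p.2 then d2.insert i p.1 else d2)
        d)
    PySem.Dict.empty

def prefix_number_words_with_digit_alt (text : String) : String :=
  let starts : PySem.Dict Int Int := pvStarts text
  PySem.Str.join ""
    ((PySem.List.enumerate text.toList 0).map
      (fun q =>
        (match starts.get? q.1 with
         | some dd => PySem.Int.toStr dd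
         | none => "") ++ String.singleton q.2))

-- ===== PRECONDITION & SPEC =====
def Spec_prefix_number_words_with_digit (text : String) (out : String) : Prop := out = prefix_number_words_with_digit_alt text
instance (text : String) (out : String) : Decidable (Spec_prefix_number_words_with_digit text out) := by unfold Spec_prefix_number_words_with_digit; infer_instance

-- ===== CLAIM (what is proved, stated in full; the proofs are below) =====
def Claim_equal_prefix_number_words_with_digit : Prop := ∀ (text : String), Dom_prefix_number_words_with_digit text → Spec_prefix_number_words_with_digit text (prefix_number_words_with_digit text)

-- ===== LEMMAS AND PROOFS =====

theorem pv_find_eq_zero_iff (s sub : List Char) :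
    ((0 : Int) = PySem.Chars.find s sub) ↔ sub <+: s := by
  constructor
  · intro h
    have h0 : (0 : Nat) ≤ s.length := Nat.zero_le _
    have hne : PySem.Chars.findFrom s sub ((0:Nat):Int) ≠ -1 := by
      simp only [Nat.cast_zero, PySem.Chars.findFrom_zero, ← h]; decide
    obtain ⟨-, h2, -⟩ := PySem.Chars.findFrom_natCast_spec s sub 0 h0 hne
    simpa [PySem.Chars.findFrom_zero, ← h] using h2
  · intro h
    have h0 : (0 : Nat) ≤ s.length := Nat.zero_le _
    have hne : PySem.Chars.findFrom s sub ((0:Nat):Int) ≠ -1 := by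
      intro hc
      rw [PySem.Chars.findFrom_natCast_eq_neg_one_iff s sub 0 h0] at hc
      simp only [List.drop_zero] at hc
      exact hc h.isInfix
    obtain ⟨h1, h2, h3⟩ := PySem.Chars.findFrom_natCast_spec s sub 0 h0 hne
    by_cases hz : (PySem.Chars.findFrom s sub ((0:Nat):Int)).toNat = 0
    · simp only [Nat.cast_zero, PySem.Chars.findFrom_zero] at h1 hz ⊢
      omega
    · exact absurd h (by simpa using h3 0 (Nat.zero_le _) (Nat.pos_of_ne_zero hz))

theorem pv_gwias_eq (s : String) :
    get_word_index_at_start s =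
      (match pvNumWords.findIdx? (fun w => w.toList.isPrefixOf s.toList) with
       | some j => (j : Int)
       | none => -1) := by
  unfold get_word_index_at_start
  simp only [pvNumWords, gwiasGo, List.findIdx?_cons, List.findIdx?_nil,
    PySem.Str.find_eq]
  have hiff : ∀ w : String, ((0 : Int) = PySem.Chars.find s.toList w.toList) ↔
      (w.toList.isPrefixOf s.toList = true) := by
    intro w; rw [pv_find_eq_zero_iff, List.isPrefixOf_iff_prefix]
  simp only [hiff]
  split_ifs <;> simp [PySem.List.index?] <;> decide

theorem pv_get?_foldl_ite_insert (l : List Int) (f : Int → Bool) (v : Int)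
    (d : PySem.Dict Int Int) (x : Int) :
    (l.foldl (fun d2 i => if f i then d2.insert i v else d2) d).get? x
      = if x ∈ l ∧ f x then some v else d.get? x := by
  induction l generalizing d with
  | nil => simp
  | cons i rest ih =>
    simp only [List.foldl_cons, ih, List.mem_cons]
    by_cases hfi : f i <;> by_cases hxi : x = i <;> by_cases hxr : x ∈ rest <;>
      simp_all [PySem.Dict.get?_insert]

theorem pv_cond_iff (text w : String) (hw : w.toList ≠ []) (kk : Nat) :
    ((kk : Int) ∈ PySem.List.pyRange 0 (PySem.Str.len text - PySem.Str.len w + 1) ∧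
      (PySem.Str.slice text (some (kk : Int)) (some ((kk : Int) + PySem.Str.len w)) == w) = true)
    ↔ w.toList <+: text.toList.drop kk := by
  have hlen : ∀ s : String, PySem.Str.len s = (s.toList.length : Int) := by
    intro s; simp [PySem.Str.len]
  have hslice : (PySem.Str.slice text (some (kk : Int)) (some ((kk : Int) + PySem.Str.len w))).toList
      = (text.toList.drop kk).take w.toList.length := by
    rw [PySem.Str.toList_slice, PySem.Chars.slice_eq_listSlice, hlen,
      PySem.List.slice_natCast_add]
  constructor
  · rintro ⟨-, heq⟩
    rw [beq_iff_eq, ← String.toList_inj, hslice] at heq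
    rw [List.prefix_iff_eq_take]
    exact heq.symm
  · intro hpre
    have hle : w.toList.length ≤ (text.toList.drop kk).length := hpre.length_le
    have hwpos : 0 < w.toList.length := List.length_pos_iff.mpr hw
    simp only [List.length_drop] at hle
    refine ⟨?_, ?_⟩
    · rw [PySem.List.mem_pyRange_one, hlen, hlen]
      constructor
      · positivity
      · omega
    · rw [beq_iff_eq, ← String.toList_inj, hslice]
      exact (List.prefix_iff_eq_take.mp hpre).symm

theorem pv_noPref : ∀ w ∈ pvNumWords, ∀ w' ∈ pvNumWords, w ≠ w' →
    ¬ (w.toList <+: w'.toList) := by decide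

theorem pv_unique (t : List Char) {w w' : String} (hw : w ∈ pvNumWords)
    (hw' : w' ∈ pvNumWords) (hne : w ≠ w') (h : w.toList <+: t) :
    ¬ w'.toList <+: t := by
  intro h'
  rcases List.prefix_or_prefix_of_prefix h h' with hc | hc
  · exact pv_noPref w hw w' hw' hne hc
  · exact pv_noPref w' hw' w hw (Ne.symm hne) hc

theorem pv_get?_starts (text : String) (kk : Nat) :
    (pvStarts text).get? (kk : Int) =
      (pvNumWords.findIdx? (fun w => w.toList.isPrefixOf (text.toList.drop kk))).map
        (fun j => (j : Int) + 1) := by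
  unfold pvStarts
  simp only [pvNumWords, PySem.List.enumerate_cons, PySem.List.enumerate_nil,
    List.foldl_cons, List.foldl_nil]
  simp only [pv_get?_foldl_ite_insert, PySem.Dict.get?_empty]
  simp only [pv_cond_iff text "one" (by decide), pv_cond_iff text "two" (by decide),
    pv_cond_iff text "three" (by decide), pv_cond_iff text "four" (by decide),
    pv_cond_iff text "five" (by decide), pv_cond_iff text "six" (by decide),
    pv_cond_iff text "seven" (by decide), pv_cond_iff text "eight" (by decide),
    pv_cond_iff text "nine" (by decide)]
  rcases hf : List.findIdx? (fun w => w.toList.isPrefixOf (List.drop kk text.toList))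
      ["one", "two", "three", "four", "five", "six", "seven", "eight", "nine"] with _ | j
  · rw [hf]
    have hall := List.findIdx?_eq_none_iff.mp hf
    simp only [List.forall_mem_cons, List.isPrefixOf_iff_prefix, Bool.eq_false_iff,
      ne_eq] at hall
    obtain ⟨h1, h2, h3, h4, h5, h6, h7, h8, h9, -⟩ := hall
    clear hf
    simp_all
  · rw [hf]
    obtain ⟨hjl, hpj, hlt⟩ := List.findIdx?_eq_some_iff_getElem.mp hf
    simp only [List.length_cons, List.length_nil] at hjl
    have honly : ∀ w ∈ pvNumWords, w.toList <+: List.drop kk text.toList →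
        w = ["one", "two", "three", "four", "five", "six", "seven", "eight", "nine"][j] := by
      intro w hwmem hwpre
      by_contra hne
      exact pv_unique (List.drop kk text.toList) (w' := w)
        (by rw [pvNumWords]; exact List.getElem_mem hjl) hwmem (fun h => hne h.symm)
        (by simpa [List.isPrefixOf_iff_prefix] using hpj) hwpre
    interval_cases j
    · simp only [List.getElem_cons_zero,
        List.isPrefixOf_iff_prefix] at hpj honly
      have hothers : ∀ w ∈ pvNumWords, w ≠ "one" → ¬ w.toList <+: List.drop kk text.toList :=
        fun w hm hne hp => hne (honly w hm hp)
      have n1 : ¬ ("two".toList <+: List.drop kk text.toList) :=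
        hothers "two" (by decide) (by decide)
      have n2 : ¬ ("three".toList <+: List.drop kk text.toList) :=
        hothers "three" (by decide) (by decide)
      have n3 : ¬ ("four".toList <+: List.drop kk text.toList) :=
        hothers "four" (by decide) (by decide)
      have n4 : ¬ ("five".toList <+: List.drop kk text.toList) :=
        hothers "five" (by decide) (by decide)
      have n5 : ¬ ("six".toList <+: List.drop kk text.toList) :=
        hothers "six" (by decide) (by decide)
      have n6 : ¬ ("seven".toList <+: List.drop kk text.toList) :=
        hothers "seven" (by decide) (by decide)
      have n7 : ¬ ("eight".toList <+: List.drop kk text.toList) :=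
        hothers "eight" (by decide) (by decide)
      have n8 : ¬ ("nine".toList <+: List.drop kk text.toList) :=
        hothers "nine" (by decide) (by decide)
      clear hf honly hothers hlt
      simp_all
    · simp only [List.getElem_cons_zero, List.getElem_cons_succ,
        List.isPrefixOf_iff_prefix] at hpj honly
      have hothers : ∀ w ∈ pvNumWords, w ≠ "two" → ¬ w.toList <+: List.drop kk text.toList :=
        fun w hm hne hp => hne (honly w hm hp)
      have n0 : ¬ ("one".toList <+: List.drop kk text.toList) :=
        hothers "one" (by decide) (by decide)
      have n2 : ¬ ("three".toList <+: List.drop kk text.toList) :=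
        hothers "three" (by decide) (by decide)
      have n3 : ¬ ("four".toList <+: List.drop kk text.toList) :=
        hothers "four" (by decide) (by decide)
      have n4 : ¬ ("five".toList <+: List.drop kk text.toList) :=
        hothers "five" (by decide) (by decide)
      have n5 : ¬ ("six".toList <+: List.drop kk text.toList) :=
        hothers "six" (by decide) (by decide)
      have n6 : ¬ ("seven".toList <+: List.drop kk text.toList) :=
        hothers "seven" (by decide) (by decide)
      have n7 : ¬ ("eight".toList <+: List.drop kk text.toList) :=
        hothers "eight" (by decide) (by decide)
      have n8 : ¬ ("nine".toList <+: List.drop kk text.toList) :=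
        hothers "nine" (by decide) (by decide)
      clear hf honly hothers hlt
      simp_all
    · simp only [List.getElem_cons_zero, List.getElem_cons_succ,
        List.isPrefixOf_iff_prefix] at hpj honly
      have hothers : ∀ w ∈ pvNumWords, w ≠ "three" → ¬ w.toList <+: List.drop kk text.toList :=
        fun w hm hne hp => hne (honly w hm hp)
      have n0 : ¬ ("one".toList <+: List.drop kk text.toList) :=
        hothers "one" (by decide) (by decide)
      have n1 : ¬ ("two".toList <+: List.drop kk text.toList) :=
        hothers "two" (by decide) (by decide)
      have n3 : ¬ ("four".toList <+: List.drop kk text.toList) :=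
        hothers "four" (by decide) (by decide)
      have n4 : ¬ ("five".toList <+: List.drop kk text.toList) :=
        hothers "five" (by decide) (by decide)
      have n5 : ¬ ("six".toList <+: List.drop kk text.toList) :=
        hothers "six" (by decide) (by decide)
      have n6 : ¬ ("seven".toList <+: List.drop kk text.toList) :=
        hothers "seven" (by decide) (by decide)
      have n7 : ¬ ("eight".toList <+: List.drop kk text.toList) :=
        hothers "eight" (by decide) (by decide)
      have n8 : ¬ ("nine".toList <+: List.drop kk text.toList) :=
        hothers "nine" (by decide) (by decide)
      clear hf honly hothers hlt
      simp_all
    · simp only [List.getElem_cons_zero, List.getElem_cons_succ,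
        List.isPrefixOf_iff_prefix] at hpj honly
      have hothers : ∀ w ∈ pvNumWords, w ≠ "four" → ¬ w.toList <+: List.drop kk text.toList :=
        fun w hm hne hp => hne (honly w hm hp)
      have n0 : ¬ ("one".toList <+: List.drop kk text.toList) :=
        hothers "one" (by decide) (by decide)
      have n1 : ¬ ("two".toList <+: List.drop kk text.toList) :=
        hothers "two" (by decide) (by decide)
      have n2 : ¬ ("three".toList <+: List.drop kk text.toList) :=
        hothers "three" (by decide) (by decide)
      have n4 : ¬ ("five".toList <+: List.drop kk text.toList) :=
        hothers "five" (by decide) (by decide)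
      have n5 : ¬ ("six".toList <+: List.drop kk text.toList) :=
        hothers "six" (by decide) (by decide)
      have n6 : ¬ ("seven".toList <+: List.drop kk text.toList) :=
        hothers "seven" (by decide) (by decide)
      have n7 : ¬ ("eight".toList <+: List.drop kk text.toList) :=
        hothers "eight" (by decide) (by decide)
      have n8 : ¬ ("nine".toList <+: List.drop kk text.toList) :=
        hothers "nine" (by decide) (by decide)
      clear hf honly hothers hlt
      simp_all
    · simp only [List.getElem_cons_zero, List.getElem_cons_succ,
        List.isPrefixOf_iff_prefix] at hpj honly
      have hothers : ∀ w ∈ pvNumWords, w ≠ "five" → ¬ w.toList <+: List.drop kk text.toList :=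
        fun w hm hne hp => hne (honly w hm hp)
      have n0 : ¬ ("one".toList <+: List.drop kk text.toList) :=
        hothers "one" (by decide) (by decide)
      have n1 : ¬ ("two".toList <+: List.drop kk text.toList) :=
        hothers "two" (by decide) (by decide)
      have n2 : ¬ ("three".toList <+: List.drop kk text.toList) :=
        hothers "three" (by decide) (by decide)
      have n3 : ¬ ("four".toList <+: List.drop kk text.toList) :=
        hothers "four" (by decide) (by decide)
      have n5 : ¬ ("six".toList <+: List.drop kk text.toList) :=
        hothers "six" (by decide) (by decide)
      have n6 : ¬ ("seven".toList <+: List.drop kk text.toList) :=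
        hothers "seven" (by decide) (by decide)
      have n7 : ¬ ("eight".toList <+: List.drop kk text.toList) :=
        hothers "eight" (by decide) (by decide)
      have n8 : ¬ ("nine".toList <+: List.drop kk text.toList) :=
        hothers "nine" (by decide) (by decide)
      clear hf honly hothers hlt
      simp_all
    · simp only [List.getElem_cons_zero, List.getElem_cons_succ,
        List.isPrefixOf_iff_prefix] at hpj honly
      have hothers : ∀ w ∈ pvNumWords, w ≠ "six" → ¬ w.toList <+: List.drop kk text.toList :=
        fun w hm hne hp => hne (honly w hm hp)
      have n0 : ¬ ("one".toList <+: List.drop kk text.toList) :=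
        hothers "one" (by decide) (by decide)
      have n1 : ¬ ("two".toList <+: List.drop kk text.toList) :=
        hothers "two" (by decide) (by decide)
      have n2 : ¬ ("three".toList <+: List.drop kk text.toList) :=
        hothers "three" (by decide) (by decide)
      have n3 : ¬ ("four".toList <+: List.drop kk text.toList) :=
        hothers "four" (by decide) (by decide)
      have n4 : ¬ ("five".toList <+: List.drop kk text.toList) :=
        hothers "five" (by decide) (by decide)
      have n6 : ¬ ("seven".toList <+: List.drop kk text.toList) :=
        hothers "seven" (by decide) (by decide)
      have n7 : ¬ ("eight".toList <+: List.drop kk text.toList) :=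
        hothers "eight" (by decide) (by decide)
      have n8 : ¬ ("nine".toList <+: List.drop kk text.toList) :=
        hothers "nine" (by decide) (by decide)
      clear hf honly hothers hlt
      simp_all
    · simp only [List.getElem_cons_zero, List.getElem_cons_succ,
        List.isPrefixOf_iff_prefix] at hpj honly
      have hothers : ∀ w ∈ pvNumWords, w ≠ "seven" → ¬ w.toList <+: List.drop kk text.toList :=
        fun w hm hne hp => hne (honly w hm hp)
      have n0 : ¬ ("one".toList <+: List.drop kk text.toList) :=
        hothers "one" (by decide) (by decide)
      have n1 : ¬ ("two".toList <+: List.drop kk text.toList) :=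
        hothers "two" (by decide) (by decide)
      have n2 : ¬ ("three".toList <+: List.drop kk text.toList) :=
        hothers "three" (by decide) (by decide)
      have n3 : ¬ ("four".toList <+: List.drop kk text.toList) :=
        hothers "four" (by decide) (by decide)
      have n4 : ¬ ("five".toList <+: List.drop kk text.toList) :=
        hothers "five" (by decide) (by decide)
      have n5 : ¬ ("six".toList <+: List.drop kk text.toList) :=
        hothers "six" (by decide) (by decide)
      have n7 : ¬ ("eight".toList <+: List.drop kk text.toList) :=
        hothers "eight" (by decide) (by decide)
      have n8 : ¬ ("nine".toList <+: List.drop kk text.toList) :=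
        hothers "nine" (by decide) (by decide)
      clear hf honly hothers hlt
      simp_all
    · simp only [List.getElem_cons_zero, List.getElem_cons_succ,
        List.isPrefixOf_iff_prefix] at hpj honly
      have hothers : ∀ w ∈ pvNumWords, w ≠ "eight" → ¬ w.toList <+: List.drop kk text.toList :=
        fun w hm hne hp => hne (honly w hm hp)
      have n0 : ¬ ("one".toList <+: List.drop kk text.toList) :=
        hothers "one" (by decide) (by decide)
      have n1 : ¬ ("two".toList <+: List.drop kk text.toList) :=
        hothers "two" (by decide) (by decide)
      have n2 : ¬ ("three".toList <+: List.drop kk text.toList) :=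
        hothers "three" (by decide) (by decide)
      have n3 : ¬ ("four".toList <+: List.drop kk text.toList) :=
        hothers "four" (by decide) (by decide)
      have n4 : ¬ ("five".toList <+: List.drop kk text.toList) :=
        hothers "five" (by decide) (by decide)
      have n5 : ¬ ("six".toList <+: List.drop kk text.toList) :=
        hothers "six" (by decide) (by decide)
      have n6 : ¬ ("seven".toList <+: List.drop kk text.toList) :=
        hothers "seven" (by decide) (by decide)
      have n8 : ¬ ("nine".toList <+: List.drop kk text.toList) :=
        hothers "nine" (by decide) (by decide)
      clear hf honly hothers hlt
      simp_all
    · simp only [List.getElem_cons_zero, List.getElem_cons_succ,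
        List.isPrefixOf_iff_prefix] at hpj honly
      have hothers : ∀ w ∈ pvNumWords, w ≠ "nine" → ¬ w.toList <+: List.drop kk text.toList :=
        fun w hm hne hp => hne (honly w hm hp)
      have n0 : ¬ ("one".toList <+: List.drop kk text.toList) :=
        hothers "one" (by decide) (by decide)
      have n1 : ¬ ("two".toList <+: List.drop kk text.toList) :=
        hothers "two" (by decide) (by decide)
      have n2 : ¬ ("three".toList <+: List.drop kk text.toList) :=
        hothers "three" (by decide) (by decide)
      have n3 : ¬ ("four".toList <+: List.drop kk text.toList) :=
        hothers "four" (by decide) (by decide)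
      have n4 : ¬ ("five".toList <+: List.drop kk text.toList) :=
        hothers "five" (by decide) (by decide)
      have n5 : ¬ ("six".toList <+: List.drop kk text.toList) :=
        hothers "six" (by decide) (by decide)
      have n6 : ¬ ("seven".toList <+: List.drop kk text.toList) :=
        hothers "seven" (by decide) (by decide)
      have n7 : ¬ ("eight".toList <+: List.drop kk text.toList) :=
        hothers "eight" (by decide) (by decide)
      clear hf honly hothers hlt
      simp_all

theorem pv_findIdx?_ext {α : Type} (p q : α → Bool) :
    ∀ (l : List α), (∀ x ∈ l, p x = q x) → List.findIdx? p l = List.findIdx? q l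
  | [], _ => rfl
  | x :: xs, h => by
    simp only [List.findIdx?_cons, h x (List.mem_cons_self),
      pv_findIdx?_ext p q xs (fun y hy => h y (List.mem_cons_of_mem _ hy))]

theorem pv_take5 (t : List Char) :
    List.findIdx? (fun w => w.toList.isPrefixOf (t.take 5)) pvNumWords
      = List.findIdx? (fun w => w.toList.isPrefixOf t) pvNumWords := by
  refine pv_findIdx?_ext _ _ _ (fun w hw => ?_)
  have hlen : w.toList.length ≤ 5 := by
    fin_cases hw <;> decide
  rw [Bool.eq_iff_iff, List.isPrefixOf_iff_prefix, List.isPrefixOf_iff_prefix,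
    List.prefix_take_iff]
  exact and_iff_left hlen

theorem pv_foldl_toList (g : Int → String) (F : String → Int → String)
    (hF : ∀ r i, F r i = r ++ g i) :
    ∀ (l : List Int) (a : String),
      (l.foldl F a).toList = a.toList ++ (l.map (fun i => (g i).toList)).flatten
  | [], a => by simp
  | i :: l, a => by
    simp only [List.foldl_cons, pv_foldl_toList g F hF l, hF, String.toList_append,
      List.map_cons, List.flatten_cons, List.append_assoc]

theorem pv_join_toList (parts : List String) :
    (PySem.Str.join "" parts).toList = (parts.map String.toList).flatten := by
  rw [PySem.Str.toList_join]
  have : ∀ pss : List (List Char), PySem.Chars.join "".toList pss = pss.flatten := by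
    intro pss
    induction pss with
    | nil => exact PySem.Chars.join_nil _
    | cons p rest ih =>
      cases rest with
      | nil => simp [PySem.Chars.join_singleton]
      | cons q rest' =>
        rw [PySem.Chars.join_cons_cons, ih]
        simp
  exact this _

theorem pv_main (text : String) :
    prefix_number_words_with_digit text = prefix_number_words_with_digit_alt text := by
  rw [← String.toList_inj]
  unfold prefix_number_words_with_digit prefix_number_words_with_digit_alt
  rw [pv_join_toList,
    pv_foldl_toList
      (g := fun i =>
        if (-1 : Int) < get_word_index_at_start (PySem.Str.slice text (some i) (some (i + 5))) then
          PySem.Int.toStr (get_word_index_at_start (PySem.Str.slice text (some i) (some (i + 5))) + 1)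
            ++ ((PySem.Str.pyGet? text i).elim "" String.singleton)
        else ((PySem.Str.pyGet? text i).elim "" String.singleton))
      (hF := by
        intro r i
        dsimp only
        split_ifs
        · rw [String.append_assoc]
        · rfl)]
  simp only [List.map_map, PySem.List.enumerate_eq_map_pyRange text.toList ' ',
    List.map_map]
  have hlenA : PySem.Str.len text = (text.toList.length : Int) := by simp [PySem.Str.len]
  have hlenB : PySem.List.len text.toList = (text.toList.length : Int) := PySem.List.len_eq _
  rw [hlenA, hlenB]
  simp only [String.toList_empty, List.nil_append]
  refine congrArg List.flatten (List.map_congr_left ?_)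
  intro i hi
  rw [PySem.List.mem_pyRange_one] at hi
  obtain ⟨h0, hn⟩ := hi
  obtain ⟨kk, rfl⟩ : ∃ kk : Nat, i = (kk : Int) := ⟨i.toNat, (Int.toNat_of_nonneg h0).symm⟩
  have hkk : kk < text.toList.length := by exact_mod_cast hn
  -- the slice of five characters
  have hslice : (PySem.Str.slice text (some (kk : Int)) (some ((kk : Int) + 5))).toList
      = (text.toList.drop kk).take 5 := by
    rw [PySem.Str.toList_slice, PySem.Chars.slice_eq_listSlice,
      show ((kk : Int) + 5) = ((kk : Int) + ((5 : Nat) : Int)) by norm_num,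
      PySem.List.slice_natCast_add]
  -- the current character
  have hchar : (PySem.Str.pyGet? text (kk : Int)) = some (text.toList[kk]'hkk) := by
    rw [PySem.Str.pyGet?_eq, PySem.Chars.pyGet?_eq_listPyGet?, PySem.List.pyGet?_natCast,
      List.getElem?_eq_getElem hkk]
  have hget : PySem.List.pyGetD text.toList (kk : Int) ' ' = text.toList[kk]'hkk :=
    PySem.List.pyGetD_eq_getElem _ _ (by positivity) (by exact_mod_cast hkk)
  rw [pv_gwias_eq, hslice, pv_take5]
  simp only [Function.comp_apply]
  rw [pv_get?_starts, hchar, hget]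
  rcases hm : List.findIdx? (fun w => w.toList.isPrefixOf (text.toList.drop kk)) pvNumWords
    with _ | j
  · rw [hm]; simp
  · rw [hm]
    have hj : (-1 : Int) < (j : Int) := by omega
    simp [hj]

-- ===== VERDICT (by name: the statement is the Claim_ definition above) =====
theorem prefix_number_words_with_digit_spec : Claim_equal_prefix_number_words_with_digit := by
  intro text _
  unfold Spec_prefix_number_words_with_digit
  exact pv_main text
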